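-- pv_equiv track=rewrite | github.com/ehauckdo/mario | metrics.py | findPowerUps
-- ===== SOURCE A (Python) =====
-- def findPowerUps(map_matrix):
-- 	powerups = ["@", "U"]
-- 	count = 0
-- 	for line in map_matrix:
-- 		for element in line:
-- 			if element in powerups:
-- 				count += 1
-- 	return count
-- ===== SOURCE B (Python) =====
-- def findPowerUps(map_matrix):
--     cells = [el for line in map_matrix for el in line]
--     return cells.count("@") + cells.count("U")
-- ===== Notes on version B (the rewrite author's own statement) =====
-- stated objective: simpler
-- what changed: B flattens the matrix once and sums two library count() calls over the two powerup symbols, instead of scanning cell by cell with a membership test and a running conditional counter.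
import Mathlib
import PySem

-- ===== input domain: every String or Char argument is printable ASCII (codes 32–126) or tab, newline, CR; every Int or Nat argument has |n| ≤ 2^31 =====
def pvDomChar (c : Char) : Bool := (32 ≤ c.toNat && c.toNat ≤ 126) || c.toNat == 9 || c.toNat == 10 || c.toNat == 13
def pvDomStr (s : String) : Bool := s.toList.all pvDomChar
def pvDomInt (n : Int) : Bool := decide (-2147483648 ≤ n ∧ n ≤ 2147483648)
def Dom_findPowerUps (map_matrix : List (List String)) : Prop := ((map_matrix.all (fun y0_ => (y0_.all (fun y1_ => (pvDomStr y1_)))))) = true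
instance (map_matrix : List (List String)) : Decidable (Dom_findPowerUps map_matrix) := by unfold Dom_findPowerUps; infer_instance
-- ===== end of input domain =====

-- B flattens the matrix once and adds two list.count() calls instead of a cell-by-cell membership scan (simpler decomposition, same cost).


-- ===== PORT A =====
def findPowerUps (map_matrix : List (List String)) : Int :=
  let powerups : List String := ["@", "U"]
  map_matrix.foldl (fun count line =>
    line.foldl (fun count element =>
      if powerups.contains element then count + 1 else count) count) 0

-- ===== PORT B =====
def findPowerUps_alt (map_matrix : List (List String)) : Int :=
  let cells : List String := map_matrix.flatMap (fun line => line)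
  (PySem.List.count cells "@" : Int) + (PySem.List.count cells "U" : Int)

-- ===== PRECONDITION & SPEC =====
def Spec_findPowerUps (map_matrix : List (List String)) (out : Int) : Prop := out = findPowerUps_alt map_matrix
instance (map_matrix : List (List String)) (out : Int) : Decidable (Spec_findPowerUps map_matrix out) := by unfold Spec_findPowerUps; infer_instance

-- ===== CLAIM (what is proved, stated in full; the proofs are below) =====
def Claim_equal_findPowerUps : Prop := ∀ (map_matrix : List (List String)), Dom_findPowerUps map_matrix → Spec_findPowerUps map_matrix (findPowerUps map_matrix)

-- ===== LEMMAS AND PROOFS =====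

-- A's inner loop over one line adds the number of '@'s plus the number of 'U's in that line.
theorem pv_inner (line : List String) (c : Int) :
    line.foldl (fun count element =>
      if (["@", "U"] : List String).contains element then count + 1 else count) c
      = c + line.count "@" + line.count "U" := by
  induction line generalizing c with
  | nil => simp
  | cons x xs ih =>
    rw [List.foldl_cons]
    by_cases hc : (["@", "U"] : List String).contains x
    · rw [if_pos hc, ih]
      have hx : x = "@" ∨ x = "U" := by
        simpa [List.contains_eq_any_beq] using hc
      rcases hx with h | h <;> subst h <;>
        simp <;> ring
    · rw [if_neg hc, ih]
      have hx : ¬ x = "@" ∧ ¬ x = "U" := by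
        constructor <;> intro h <;> subst h <;> simp at hc
      simp [hx.1, hx.2]

-- A's outer loop, generalized over the starting accumulator.
theorem pv_outer (m : List (List String)) (c : Int) :
    m.foldl (fun count line =>
      line.foldl (fun count element =>
        if (["@", "U"] : List String).contains element then count + 1 else count) count) c
      = c + ((m.flatMap (fun line => line)).count "@" : Int)
          + ((m.flatMap (fun line => line)).count "U" : Int) := by
  induction m generalizing c with
  | nil => simp
  | cons l rest ih =>
    rw [List.foldl_cons, ih, pv_inner, List.flatMap_cons, List.count_append,
      List.count_append]
    push_cast
    ring

-- ===== VERDICT (by name: the statement is the Claim_ definition above) =====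
theorem findPowerUps_spec : Claim_equal_findPowerUps := by
  intro m _
  unfold Spec_findPowerUps findPowerUps findPowerUps_alt
  simp only [PySem.List.count_eq, pv_outer]
  ring
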